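-- pv_equiv track=rewrite | github.com/gustaaragao/competitive-programming | beecrowd/ad-hoc/2806 - Ingredientes Típicos.py | is_tipico
-- ===== SOURCE A (Python) =====
-- def is_tipico(porcao, porcoes_entrada, tipicos, cache):
--     if porcao in cache:
--         return cache[porcao]
--
--     componentes = porcoes_entrada.get(porcao, [])
--
--
--     acc_tipicos = 0
--     for componente in componentes:
--         if componente in tipicos:
--             acc_tipicos += 1
--         elif componente in porcoes_entrada:
--             if is_tipico(componente, porcoes_entrada, tipicos, cache):
--                 acc_tipicos += 1
--
--     resultado = acc_tipicos > (len(componentes) // 2)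
--     cache[porcao] = resultado
--     return resultado
-- ===== SOURCE B (Python) =====
-- def is_tipico(porcao, porcoes_entrada, tipicos, cache):
--     # Bottom-up rounds (Kahn-style) instead of top-down memoised recursion.
--     # Does not mutate the caller's cache; equivalence is about the return value.
--     val = dict(cache)
--     pending = [k for k in porcoes_entrada if k not in val]
--     while pending:
--         rest = [k for k in pending
--                 if any(c not in tipicos and c in porcoes_entrada and c not in val
--                        for c in porcoes_entrada[k])]
--         for k in pending:
--             if k not in rest:
--                 comps = porcoes_entrada[k]
--                 hits = sum(1 for c in comps
--                            if c in tipicos or (c in porcoes_entrada and val[c]))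
--                 val[k] = 2 * hits > len(comps)
--         if len(rest) == len(pending):
--             break
--         pending = rest
--     if porcao in val:
--         return val[porcao]
--     comps = porcoes_entrada.get(porcao, [])
--     hits = sum(1 for c in comps if c in tipicos or (c in porcoes_entrada and val.get(c, False)))
--     return 2 * hits > len(comps)
-- ===== Notes on version B (the rewrite author's own statement) =====
-- stated objective: alternative
-- what changed: A's top-down memoised recursion (threading a mutable cache through recursive calls) is replaced by a bottom-up, round-based Kahn-style resolution: B repeatedly resolves every key whose non-typical key-components are already tabled, filling one value table iteratively, then answers by lookup; B does not mutate the caller's cache and cannot hit Python's recursion limit.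
import Mathlib
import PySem

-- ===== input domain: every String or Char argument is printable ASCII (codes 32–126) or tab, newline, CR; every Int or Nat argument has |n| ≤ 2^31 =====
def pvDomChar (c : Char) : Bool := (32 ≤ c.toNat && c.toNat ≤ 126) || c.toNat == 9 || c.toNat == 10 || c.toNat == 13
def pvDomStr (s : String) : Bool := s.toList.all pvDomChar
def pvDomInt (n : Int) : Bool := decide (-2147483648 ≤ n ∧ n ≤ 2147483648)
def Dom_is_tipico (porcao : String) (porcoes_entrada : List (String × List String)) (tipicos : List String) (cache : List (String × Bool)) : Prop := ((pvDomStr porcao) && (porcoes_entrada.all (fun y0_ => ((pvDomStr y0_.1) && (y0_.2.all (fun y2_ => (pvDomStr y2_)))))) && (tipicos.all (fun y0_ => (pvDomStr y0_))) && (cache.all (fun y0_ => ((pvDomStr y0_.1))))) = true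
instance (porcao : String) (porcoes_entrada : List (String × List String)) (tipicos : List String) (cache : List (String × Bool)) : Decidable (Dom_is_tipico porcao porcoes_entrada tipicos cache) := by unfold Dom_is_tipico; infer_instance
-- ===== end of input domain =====

-- B replaces A's top-down memoised recursion by a bottom-up round-based (Kahn-style)
-- resolution of portion values; equivalence is about the RETURN value only
-- (A mutates the caller's cache dict, B does not).

-- ===== PORT A =====
-- A's recursion, with the cache threaded through; fuel (never exhausted on Pre_ inputs,
-- since there A's recursion depth is bounded by the number of keys).
def goA (pe : PySem.Dict String (List String)) (tips : List String) :
    Nat → String → PySem.Dict String Bool → Bool × PySem.Dict String Bool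
  | 0, _, c => (false, c)
  | f + 1, p, c =>
    match c.get? p with
    | some b => (b, c)
    | none =>
      let comps := pe.getD p []
      let s := comps.foldl (fun (st : Nat × PySem.Dict String Bool) comp =>
          if comp ∈ tips then (st.1 + 1, st.2)
          else if pe.contains comp then
            let r := goA pe tips f comp st.2
            (if r.1 then st.1 + 1 else st.1, r.2)
          else st) (0, c)
      let res := decide (comps.length / 2 < s.1)
      (res, s.2.insert p res)

def is_tipico (porcao : String) (porcoes_entrada : List (String × List String)) (tipicos : List String) (cache : List (String × Bool)) : Bool :=
  (goA (PySem.Dict.mk porcoes_entrada) tipicos (porcoes_entrada.length + 1) porcao (PySem.Dict.mk cache)).1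

-- ===== PORT B =====
-- the counted condition of B's final comprehension (helper so both sites share it)
def tips_mem (tips : List String) (pe : PySem.Dict String (List String)) (val : PySem.Dict String Bool) (c : String) : Bool :=
  tips.contains c || (pe.contains c && val.getD c false)

-- One round of B's while-loop body: `rest` = still-blocked keys, then resolve the rest;
-- the loop breaks when no key got resolved (so B terminates on every input).
def goB (pe : PySem.Dict String (List String)) (tips : List String) :
    Nat → PySem.Dict String Bool → List String → PySem.Dict String Bool
  | 0, val, _ => val
  | f + 1, val, pending =>
    if pending.isEmpty then val else
    let rest := pending.filter (fun k => (pe.getD k []).any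
        (fun c => !tips.contains c && pe.contains c && !val.contains c))
    let val' := pending.foldl (fun v k =>
        if rest.contains k then v
        else
          let comps := pe.getD k []
          let hits := comps.countP (fun c => tips.contains c || (pe.contains c && v.getD c false))
          v.insert k (decide (comps.length < 2 * hits))) val
    if rest.length = pending.length then val' else goB pe tips f val' rest

def is_tipico_alt (porcao : String) (porcoes_entrada : List (String × List String)) (tipicos : List String) (cache : List (String × Bool)) : Bool :=
  let pe := PySem.Dict.mk porcoes_entrada
  let val0 := PySem.Dict.mk cache
  let pending := pe.keys.filter (fun k => !val0.contains k)
  let val := goB pe tipicos (pending.length + 1) val0 pending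
  match val.get? porcao with
  | some b => b
  | none =>
    let comps := pe.getD porcao []
    decide (comps.length < 2 * comps.countP
      (fun c => tips_mem tipicos pe val c))

-- ===== PRECONDITION & SPEC =====
-- the dependency edges A recurses along: components of k that are un-typical,
-- are themselves keys, and are not pre-cached
def SuccD (pe : PySem.Dict String (List String)) (tips : List String) (v0 : PySem.Dict String Bool) (k : String) : List String :=
  (pe.getD k []).filter (fun c => !tips.contains c && pe.contains c && !v0.contains c)

-- one peeling step: keep the nodes that still have a successor in the set
def peelStep (succ : String → List String) (S : List String) : List String :=
  S.filter (fun k => (succ k).any (fun c => S.contains c))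

-- the set of un-cached keys still un-peeled after i rounds; after `number of keys`
-- rounds this is exactly the set of keys that can reach a dependency cycle
def SD (pe : PySem.Dict String (List String)) (tips : List String) (v0 : PySem.Dict String Bool) (i : Nat) : List String :=
  (peelStep (SuccD pe tips v0))^[i] (pe.keys.filter (fun k => !v0.contains k))

-- Pre_ excludes exactly the inputs on which A raises: porcao is an un-cached key from
-- which a dependency cycle of un-cached keys is reachable (porcao survives the Kahn
-- peeling of the un-cached dependency graph), so A's recursion never terminates
-- (RecursionError in Python).
def Pre_is_tipico (porcao : String) (porcoes_entrada : List (String × List String)) (tipicos : List String) (cache : List (String × Bool)) : Prop :=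
  (PySem.Dict.mk porcoes_entrada).contains porcao = true →
  (PySem.Dict.mk cache).contains porcao = false →
  porcao ∉ SD (PySem.Dict.mk porcoes_entrada) tipicos (PySem.Dict.mk cache) porcoes_entrada.length
instance (porcao : String) (porcoes_entrada : List (String × List String)) (tipicos : List String) (cache : List (String × Bool)) : Decidable (Pre_is_tipico porcao porcoes_entrada tipicos cache) := by unfold Pre_is_tipico; infer_instance

def pvWitness_is_tipico : String × (List (String × List String)) × List String × (List (String × Bool)) :=
  ("feijoada", [("feijoada", ["feijao", "arroz", "farofa"]), ("arroz", [])], ["feijao"], [("farofa", true)])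

def Spec_is_tipico (porcao : String) (porcoes_entrada : List (String × List String)) (tipicos : List String) (cache : List (String × Bool)) (out : Bool) : Prop := out = is_tipico_alt porcao porcoes_entrada tipicos cache
instance (porcao : String) (porcoes_entrada : List (String × List String)) (tipicos : List String) (cache : List (String × Bool)) (out : Bool) : Decidable (Spec_is_tipico porcao porcoes_entrada tipicos cache out) := by unfold Spec_is_tipico; infer_instance

-- ===== CLAIM (what is proved, stated in full; the proofs are below) =====
def Claim_equal_is_tipico : Prop := ∀ (porcao : String) (porcoes_entrada : List (String × List String)) (tipicos : List String) (cache : List (String × Bool)), Dom_is_tipico porcao porcoes_entrada tipicos cache → Pre_is_tipico porcao porcoes_entrada tipicos cache → Spec_is_tipico porcao porcoes_entrada tipicos cache (is_tipico porcao porcoes_entrada tipicos cache)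

-- ===== LEMMAS AND PROOFS =====

-- ---- peeling (SD) facts ----
lemma SD_succ (pe : PySem.Dict String (List String)) (tips : List String) (v0 : PySem.Dict String Bool) (i : Nat) :
    SD pe tips v0 (i + 1) = peelStep (SuccD pe tips v0) (SD pe tips v0 i) := by
  unfold SD
  exact Function.iterate_succ_apply' _ _ _

lemma SD_succ_sub (pe : PySem.Dict String (List String)) (tips : List String) (v0 : PySem.Dict String Bool) (i : Nat)
    {x : String} (hx : x ∈ SD pe tips v0 (i + 1)) : x ∈ SD pe tips v0 i := by
  rw [SD_succ] at hx
  exact List.mem_of_mem_filter hx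

lemma SD_out_mono (pe : PySem.Dict String (List String)) (tips : List String) (v0 : PySem.Dict String Bool)
    {i j : Nat} (hij : i ≤ j) {x : String} (hx : x ∉ SD pe tips v0 i) : x ∉ SD pe tips v0 j := by
  induction j with
  | zero =>
    have : i = 0 := Nat.le_zero.1 hij
    simpa [this] using hx
  | succ j ih =>
    by_cases h : i = j + 1
    · simpa [h] using hx
    · intro hmem
      exact ih (by omega) (SD_succ_sub pe tips v0 j hmem)

lemma SD_frontier (pe : PySem.Dict String (List String)) (tips : List String) (v0 : PySem.Dict String Bool) :
    ∀ (m : Nat) (x : String), x ∈ SD pe tips v0 0 → x ∉ SD pe tips v0 m →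
      ∃ i, i < m ∧ x ∈ SD pe tips v0 i ∧ x ∉ SD pe tips v0 (i + 1) := by
  intro m
  induction m with
  | zero => intro x h0 hm; exact absurd h0 hm
  | succ m ih =>
    intro x h0 hm
    by_cases hx : x ∈ SD pe tips v0 m
    · exact ⟨m, Nat.lt_succ_self m, hx, hm⟩
    · obtain ⟨i, hi, h1, h2⟩ := ih x h0 hx
      exact ⟨i, Nat.lt_succ_of_lt hi, h1, h2⟩

lemma peel_out (pe : PySem.Dict String (List String)) (tips : List String) (v0 : PySem.Dict String Bool) (i : Nat)
    {x : String} (hx : x ∈ SD pe tips v0 i) (hx' : x ∉ SD pe tips v0 (i + 1)) :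
    ∀ c ∈ SuccD pe tips v0 x, c ∉ SD pe tips v0 i := by
  intro c hc hmem
  apply hx'
  rw [SD_succ]
  unfold peelStep
  refine List.mem_filter.2 ⟨hx, ?_⟩
  exact List.any_eq_true.2 ⟨c, hc, by simpa using hmem⟩

lemma succ_peeled (pe : PySem.Dict String (List String)) (tips : List String) (v0 : PySem.Dict String Bool) (m : Nat)
    {x : String} (h0 : x ∈ SD pe tips v0 0) (hm : x ∉ SD pe tips v0 m) :
    ∀ c ∈ SuccD pe tips v0 x, c ∉ SD pe tips v0 (m - 1) := by
  obtain ⟨i, hi, h1, h2⟩ := SD_frontier pe tips v0 m x h0 hm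
  intro c hc
  exact SD_out_mono pe tips v0 (by omega) (peel_out pe tips v0 i h1 h2 c hc)

lemma SD_sustain (pe : PySem.Dict String (List String)) (tips : List String) (v0 : PySem.Dict String Bool)
    (P : List String) (h0 : ∀ k ∈ P, k ∈ SD pe tips v0 0)
    (hs : ∀ k ∈ P, ∃ c ∈ SuccD pe tips v0 k, c ∈ P) :
    ∀ i, ∀ k ∈ P, k ∈ SD pe tips v0 i := by
  intro i
  induction i with
  | zero => exact h0
  | succ i ih =>
    intro k hk
    rw [SD_succ]
    unfold peelStep
    refine List.mem_filter.2 ⟨ih k hk, ?_⟩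
    obtain ⟨c, hc, hcP⟩ := hs k hk
    exact List.any_eq_true.2 ⟨c, hc, by simpa using ih c hcP⟩

-- ---- small Dict helpers ----
lemma contains_of_get?_some (d : PySem.Dict String Bool) {x : String} {b : Bool}
    (h : d.get? x = some b) : d.contains x = true := by
  rw [PySem.Dict.contains_eq_isSome_get?, h]; rfl

lemma get?_eq_some_getD (d : PySem.Dict String Bool) {x : String}
    (h : d.contains x = true) : d.get? x = some (d.getD x false) := by
  rw [PySem.Dict.contains_eq_isSome_get?] at h
  obtain ⟨b, hb⟩ := Option.isSome_iff_exists.1 h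
  rw [hb, PySem.Dict.getD_eq_get?_getD, hb]; rfl

lemma not_contains_of_get?_none (d : PySem.Dict String Bool) {x : String}
    (h : d.get? x = none) : d.contains x = false := by
  rw [PySem.Dict.contains_eq_isSome_get?, h]; rfl

-- ---- A-side invariant: the threaded cache agrees with B's final table on keys,
-- and covers the initial cache ----
def AInv (pe : PySem.Dict String (List String)) (v0 V c : PySem.Dict String Bool) : Prop :=
  (∀ x, v0.contains x = true → c.contains x = true) ∧
  (∀ x, pe.contains x = true → c.contains x = true → c.get? x = V.get? x)

lemma mem_SD_zero (pe : PySem.Dict String (List String)) (tips : List String) (v0 : PySem.Dict String Bool)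
    {p : String} (hk : pe.contains p = true) (hv : v0.contains p = false) :
    p ∈ SD pe tips v0 0 := by
  show p ∈ pe.keys.filter _
  exact List.mem_filter.2 ⟨(PySem.Dict.contains_iff_mem_keys _ _).1 hk, by simp [hv]⟩

lemma foldA_ok (pe : PySem.Dict String (List String)) (tips : List String) (v0 V : PySem.Dict String Bool)
    (N f : Nat)
    (IH : ∀ (p : String) (c : PySem.Dict String Bool), f ≤ N + 1 → 1 ≤ f → AInv pe v0 V c →
      (pe.contains p = true → c.contains p = false → p ∉ SD pe tips v0 (f - 1)) →
      ((goA pe tips f p c).1 = (match c.get? p with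
         | some b => b
         | none => if pe.contains p then V.getD p false else false)) ∧
      AInv pe v0 V (goA pe tips f p c).2)
    (hfN : f ≤ N + 1) (hf1 : 1 ≤ f) :
    ∀ (l : List String) (c : PySem.Dict String Bool) (acc : Nat),
      AInv pe v0 V c →
      (∀ comp ∈ l, tips.contains comp = false → pe.contains comp = true →
         v0.contains comp = false → comp ∉ SD pe tips v0 (f - 1)) →
      ((l.foldl (fun (st : Nat × PySem.Dict String Bool) comp =>
          if comp ∈ tips then (st.1 + 1, st.2)
          else if pe.contains comp then
            let r := goA pe tips f comp st.2
            (if r.1 then st.1 + 1 else st.1, r.2)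
          else st) (acc, c)).1 = acc + l.countP (tips_mem tips pe V)) ∧
      AInv pe v0 V ((l.foldl (fun (st : Nat × PySem.Dict String Bool) comp =>
          if comp ∈ tips then (st.1 + 1, st.2)
          else if pe.contains comp then
            let r := goA pe tips f comp st.2
            (if r.1 then st.1 + 1 else st.1, r.2)
          else st) (acc, c)).2) := by
  intro l
  induction l with
  | nil => intro c acc hinv _; exact ⟨by simp, hinv⟩
  | cons comp tl ih =>
    intro c acc hinv hl
    by_cases ht : comp ∈ tips
    · have htb : tips.contains comp = true := List.contains_iff_mem.2 ht
      have := ih c (acc + 1) hinv (fun x hx => hl x (List.mem_cons_of_mem _ hx))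
      simp only [List.foldl_cons, if_pos ht, List.countP_cons]
      refine ⟨?_, this.2⟩
      rw [this.1]
      simp [tips_mem, ht]
      omega
    · have htb : tips.contains comp = false := by
        rw [← Bool.not_eq_true]; exact fun h => ht (List.contains_iff_mem.1 h)
      by_cases hk : pe.contains comp = true
      · -- recursive call
        have hguard : pe.contains comp = true → c.contains comp = false → comp ∉ SD pe tips v0 (f - 1) := by
          intro _ hcc
          have hv : v0.contains comp = false := by
            rw [← Bool.not_eq_true]
            intro hv; rw [hinv.1 comp hv] at hcc; exact Bool.true_eq_false ▸ (by simp at hcc)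
          exact hl comp (List.mem_cons_self) htb hk hv
        obtain ⟨hval, hinv'⟩ := IH comp c hfN hf1 hinv hguard
        have hres : (goA pe tips f comp c).1 = V.getD comp false := by
          rw [hval]
          cases hcc : c.get? comp with
          | some b =>
            have := hinv.2 comp hk (contains_of_get?_some c hcc)
            rw [hcc] at this
            rw [PySem.Dict.getD_eq_get?_getD, ← this]
            rfl
          | none => simp [hk]
        have := ih (goA pe tips f comp c).2 (if (goA pe tips f comp c).1 then acc + 1 else acc)
          hinv' (fun x hx => hl x (List.mem_cons_of_mem _ hx))
        simp only [List.foldl_cons, if_neg ht, if_pos hk, List.countP_cons]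
        refine ⟨?_, this.2⟩
        rw [this.1, hres]
        simp [tips_mem, hk]
        cases hVd : V.getD comp false <;> simp <;> omega
      · have hkb : pe.contains comp = false := by
          rw [← Bool.not_eq_true]; exact hk
        have := ih c acc hinv (fun x hx => hl x (List.mem_cons_of_mem _ hx))
        simp only [List.foldl_cons, List.countP_cons, if_neg ht, hkb, Bool.false_eq_true, if_false]
        refine ⟨?_, this.2⟩
        rw [this.1]
        simp [tips_mem, hkb]
        omega

lemma goA_ok (pe : PySem.Dict String (List String)) (tips : List String) (v0 V : PySem.Dict String Bool)
    (N : Nat)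
    (hcov : ∀ x, pe.contains x = true → v0.contains x = false → x ∉ SD pe tips v0 N → V.contains x = true)
    (hfix : ∀ k, pe.contains k = true → v0.contains k = false → k ∉ SD pe tips v0 N →
       V.getD k false = decide ((pe.getD k []).length < 2 * (pe.getD k []).countP (tips_mem tips pe V))) :
    ∀ (f : Nat) (p : String) (c : PySem.Dict String Bool), f ≤ N + 1 → 1 ≤ f → AInv pe v0 V c →
      (pe.contains p = true → c.contains p = false → p ∉ SD pe tips v0 (f - 1)) →
      ((goA pe tips f p c).1 = (match c.get? p with
         | some b => b
         | none => if pe.contains p then V.getD p false else false)) ∧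
      AInv pe v0 V (goA pe tips f p c).2 := by
  intro f
  induction f with
  | zero => intro p c _ h; omega
  | succ f ihf =>
    intro p c hfN _ hinv hguard
    cases hc : c.get? p with
    | some b => simp [goA, hc]; exact hinv
    | none =>
      have hcp : c.contains p = false := not_contains_of_get?_none c hc
      by_cases hkey : pe.contains p = true
      · have hv0 : v0.contains p = false := by
          rw [← Bool.not_eq_true]
          intro hv; rw [hinv.1 p hv] at hcp; simp at hcp
        have hSD0 : p ∈ SD pe tips v0 0 := mem_SD_zero pe tips v0 hkey hv0
        have hout : p ∉ SD pe tips v0 f := by simpa using hguard hkey hcp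
        have houtN : p ∉ SD pe tips v0 N := SD_out_mono pe tips v0 (by omega) hout
        have hf1 : 1 ≤ f := by
          rcases Nat.eq_zero_or_pos f with h0 | h; · exact absurd (h0 ▸ hSD0) hout
          · exact h
        have hsucc : ∀ comp ∈ pe.getD p [], tips.contains comp = false → pe.contains comp = true →
            v0.contains comp = false → comp ∉ SD pe tips v0 (f - 1) := by
          intro comp hmem htc hkc hvc
          refine succ_peeled pe tips v0 f hSD0 hout comp ?_
          unfold SuccD
          exact List.mem_filter.2 ⟨hmem, by rw [htc, hkc, hvc]; rfl⟩
        obtain ⟨hval, hinv'⟩ := foldA_ok pe tips v0 V N f (fun p c => ihf p c) (by omega) hf1 (pe.getD p []) c 0 hinv hsucc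
        have hVc : V.contains p = true := hcov p hkey hv0 houtN
        have hgo : goA pe tips (f + 1) p c =
            (V.getD p false,
             ((pe.getD p []).foldl (fun (st : Nat × PySem.Dict String Bool) comp =>
                if comp ∈ tips then (st.1 + 1, st.2)
                else if pe.contains comp then
                  let r := goA pe tips f comp st.2
                  (if r.1 then st.1 + 1 else st.1, r.2)
                else st) (0, c)).2.insert p (V.getD p false)) := by
          have hres : (decide ((pe.getD p []).length / 2 <
              ((pe.getD p []).foldl (fun (st : Nat × PySem.Dict String Bool) comp =>
                if comp ∈ tips then (st.1 + 1, st.2)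
                else if pe.contains comp then
                  let r := goA pe tips f comp st.2
                  (if r.1 then st.1 + 1 else st.1, r.2)
                else st) (0, c)).1)) = V.getD p false := by
            rw [hval, hfix p hkey hv0 houtN, decide_eq_decide]
            omega
          simp only [goA, hc]
          rw [hres]
        rw [hgo]
        constructor
        · simp [hkey]
        · constructor
          · intro x hx
            rw [PySem.Dict.contains_insert]
            simp [hinv'.1 x hx]
          · intro x hkx hcx
            by_cases hxp : x = p
            · subst hxp
              rw [PySem.Dict.get?_insert, if_pos rfl, get?_eq_some_getD V hVc]
            · rw [PySem.Dict.get?_insert, if_neg hxp]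
              rw [PySem.Dict.contains_insert] at hcx
              refine hinv'.2 x hkx ?_
              rcases Bool.or_eq_true_iff.1 hcx with h | h
              · exact absurd (by simpa using h) hxp
              · exact h
      · have hkb : pe.contains p = false := by rw [← Bool.not_eq_true]; exact hkey
        have hcomps : pe.getD p [] = [] := PySem.Dict.getD_of_not_contains pe [] hkb
        have hgo : goA pe tips (f + 1) p c = (false, c.insert p false) := by
          simp [goA, hc, hcomps]
        rw [hgo]
        constructor
        · simp [hkb]
        · constructor
          · intro x hx
            rw [PySem.Dict.contains_insert]
            simp [hinv.1 x hx]
          · intro x hkx hcx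
            have hxp : x ≠ p := by
              intro h; rw [h, hkb] at hkx; simp at hkx
            rw [PySem.Dict.get?_insert]
            simp only [if_neg hxp]
            rw [PySem.Dict.contains_insert] at hcx
            refine hinv.2 x hkx ?_
            rcases Bool.or_eq_true_iff.1 hcx with h | h
            · exact absurd (by simpa using h) hxp
            · exact h

-- ---- B-side invariant: the growing table extends the initial cache, lives on keys,
-- and each resolved key stores the majority formula over the table ----
def BInv (pe : PySem.Dict String (List String)) (tips : List String) (v0 val : PySem.Dict String Bool) : Prop :=
  (∀ x, v0.contains x = true → val.get? x = v0.get? x) ∧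
  (∀ x, val.contains x = true → v0.contains x = true ∨ pe.contains x = true) ∧
  (∀ k, pe.contains k = true → v0.contains k = false → val.contains k = true →
     (∀ c ∈ pe.getD k [], tips.contains c = true ∨ pe.contains c = false ∨ val.contains c = true) ∧
     val.getD k false = decide ((pe.getD k []).length < 2 * (pe.getD k []).countP (tips_mem tips pe val)))

lemma BInv_dom (pe : PySem.Dict String (List String)) (tips : List String) (v0 val : PySem.Dict String Bool)
    (h : BInv pe tips v0 val) {x : String} (hx : v0.contains x = true) : val.contains x = true := by
  rw [PySem.Dict.contains_eq_isSome_get?, h.1 x hx, ← PySem.Dict.contains_eq_isSome_get?]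
  exact hx

lemma contains_of_get?_pres (d d' : PySem.Dict String Bool) {x : String}
    (hpres : d'.get? x = d.get? x) (hx : d.contains x = true) : d'.contains x = true := by
  rw [PySem.Dict.contains_eq_isSome_get?, hpres, ← PySem.Dict.contains_eq_isSome_get?]
  exact hx

lemma getD_of_get?_pres (d d' : PySem.Dict String Bool) {x : String}
    (hpres : d'.get? x = d.get? x) : d'.getD x false = d.getD x false := by
  rw [PySem.Dict.getD_eq_get?_getD, hpres, ← PySem.Dict.getD_eq_get?_getD]

lemma tips_mem_congr (tips : List String) (pe : PySem.Dict String (List String)) (v' val : PySem.Dict String Bool)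
    {c : String}
    (h : tips.contains c = true ∨ pe.contains c = false ∨ (val.contains c = true ∧ v'.get? c = val.get? c)) :
    tips_mem tips pe v' c = tips_mem tips pe val c := by
  rcases h with h | h | ⟨_, h⟩
  · simp only [tips_mem, h, Bool.true_or]
  · simp only [tips_mem, h, Bool.false_and, Bool.or_false]
  · simp only [tips_mem]
    rw [getD_of_get?_pres val v' h]

lemma foldB_ok (pe : PySem.Dict String (List String)) (tips : List String) (v0 val : PySem.Dict String Bool)
    (pending rest : List String)
    (hpend : ∀ k ∈ pending, pe.contains k = true ∧ v0.contains k = false ∧ val.contains k = false)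
    (hno : ∀ k ∈ pending, k ∉ rest → ∀ c ∈ pe.getD k [],
        tips.contains c = true ∨ pe.contains c = false ∨ val.contains c = true) :
    ∀ (l : List String) (v : PySem.Dict String Bool), (∀ k ∈ l, k ∈ pending) →
      (∀ x, val.contains x = true → v.get? x = val.get? x) →
      (∀ x, v.contains x = true → val.contains x = true ∨ (x ∈ pending ∧ x ∉ rest)) →
      (∀ x, val.contains x = false → v.contains x = true →
         v.getD x false = decide ((pe.getD x []).length < 2 * (pe.getD x []).countP (tips_mem tips pe val))) →
      (let v' := l.foldl (fun v k =>
          if rest.contains k then v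
          else
            v.insert k (decide ((pe.getD k []).length <
              2 * (pe.getD k []).countP (fun c => tips.contains c || (pe.contains c && v.getD c false))))) v
       (∀ x, val.contains x = true → v'.get? x = val.get? x) ∧
       (∀ x, v'.contains x = true → val.contains x = true ∨ (x ∈ pending ∧ x ∉ rest)) ∧
       (∀ x, val.contains x = false → v'.contains x = true →
          v'.getD x false = decide ((pe.getD x []).length < 2 * (pe.getD x []).countP (tips_mem tips pe val))) ∧
       (∀ k ∈ l, k ∉ rest → v'.contains k = true) ∧
       (∀ x, v.contains x = true → v'.contains x = true)) := by
  intro l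
  induction l with
  | nil => intro v _ p0 p1 p2; exact ⟨p0, p1, p2, by simp, fun x h => h⟩
  | cons k tl ih =>
    intro v hl p0 p1 p2
    by_cases hkr : k ∈ rest
    · have hkrb : rest.contains k = true := List.contains_iff_mem.2 hkr
      simp only [List.foldl_cons, hkrb, if_pos]
      have := ih v (fun x hx => hl x (List.mem_cons_of_mem _ hx)) p0 p1 p2
      exact ⟨this.1, this.2.1, this.2.2.1,
        fun x hx hxr => by
          rcases List.mem_cons.1 hx with h | h
          · exact absurd (h ▸ hkr) (h ▸ hxr)
          · exact this.2.2.2.1 x h hxr,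
        this.2.2.2.2⟩
    · have hkrb : rest.contains k = false := by
        rw [← Bool.not_eq_true]; exact fun h => hkr (List.contains_iff_mem.1 h)
      have hkp : k ∈ pending := hl k List.mem_cons_self
      obtain ⟨hkkey, hkv0, hkval⟩ := hpend k hkp
      have hguard := hno k hkp hkr
      -- the hits computed from v equal the hits computed from the round-start table
      have hcnt : (pe.getD k []).countP (fun c => tips.contains c || (pe.contains c && v.getD c false))
          = (pe.getD k []).countP (tips_mem tips pe val) := by
        refine List.countP_congr (fun c hc => ?_)
        have heq : tips_mem tips pe v c = tips_mem tips pe val c := by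
          refine tips_mem_congr tips pe v val ?_
          rcases hguard c hc with h | h | h
          · exact Or.inl h
          · exact Or.inr (Or.inl h)
          · exact Or.inr (Or.inr ⟨h, p0 c h⟩)
        show tips_mem tips pe v c = true ↔ tips_mem tips pe val c = true
        rw [heq]
      set w := decide ((pe.getD k []).length < 2 * (pe.getD k []).countP (tips_mem tips pe val)) with hw
      have hstep : (if rest.contains k then v
          else v.insert k (decide ((pe.getD k []).length <
            2 * (pe.getD k []).countP (fun c => tips.contains c || (pe.contains c && v.getD c false))))) = v.insert k w := by
        rw [hkrb, hcnt, hw]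
        simp
      simp only [List.foldl_cons, hstep]
      have p0' : ∀ x, val.contains x = true → (v.insert k w).get? x = val.get? x := by
        intro x hx
        have hxk : x ≠ k := fun h => by rw [h, hkval] at hx; simp at hx
        rw [PySem.Dict.get?_insert, if_neg hxk]; exact p0 x hx
      have p1' : ∀ x, (v.insert k w).contains x = true → val.contains x = true ∨ (x ∈ pending ∧ x ∉ rest) := by
        intro x hx
        rw [PySem.Dict.contains_insert] at hx
        rcases Bool.or_eq_true_iff.1 hx with h | h
        · exact (by simpa using h : x = k) ▸ Or.inr ⟨hkp, hkr⟩
        · exact p1 x h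
      have p2' : ∀ x, val.contains x = false → (v.insert k w).contains x = true →
          (v.insert k w).getD x false = decide ((pe.getD x []).length < 2 * (pe.getD x []).countP (tips_mem tips pe val)) := by
        intro x hx hcx
        rw [PySem.Dict.getD_insert]
        by_cases hxk : x = k
        · rw [if_pos hxk, hxk, hw]
        · rw [if_neg hxk]
          rw [PySem.Dict.contains_insert] at hcx
          rcases Bool.or_eq_true_iff.1 hcx with h | h
          · exact absurd (by simpa using h) hxk
          · exact p2 x hx h
      have := ih (v.insert k w) (fun x hx => hl x (List.mem_cons_of_mem _ hx)) p0' p1' p2'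
      refine ⟨this.1, this.2.1, this.2.2.1, ?_, ?_⟩
      · intro x hx hxr
        rcases List.mem_cons.1 hx with h | h
        · subst h
          exact this.2.2.2.2 x (by rw [PySem.Dict.contains_insert]; simp)
        · exact this.2.2.2.1 x h hxr
      · intro x hx
        refine this.2.2.2.2 x ?_
        rw [PySem.Dict.contains_insert]
        simp [hx]

-- the resolving fold does nothing when every pending key is still blocked
lemma foldl_stall (pe : PySem.Dict String (List String)) (tips : List String) (rest : List String) :
    ∀ (l : List String) (v : PySem.Dict String Bool), (∀ k ∈ l, k ∈ rest) →
      l.foldl (fun v k =>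
          if rest.contains k then v
          else
            v.insert k (decide ((pe.getD k []).length <
              2 * (pe.getD k []).countP (fun c => tips.contains c || (pe.contains c && v.getD c false))))) v = v := by
  intro l
  induction l with
  | nil => intro v _; rfl
  | cons k tl ih =>
    intro v hl
    have hk : rest.contains k = true := List.contains_iff_mem.2 (hl k List.mem_cons_self)
    simp only [List.foldl_cons, hk, if_pos]
    exact ih v (fun x hx => hl x (List.mem_cons_of_mem _ hx))

lemma goB_ok (pe : PySem.Dict String (List String)) (tips : List String) (v0 : PySem.Dict String Bool)
    (N : Nat) :
    ∀ (f : Nat) (val : PySem.Dict String Bool) (pending : List String), pending.length < f →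
      BInv pe tips v0 val →
      (∀ k ∈ pending, pe.contains k = true ∧ v0.contains k = false ∧ val.contains k = false) →
      (∀ k, pe.contains k = true → v0.contains k = false → val.contains k = false → k ∈ pending) →
      BInv pe tips v0 (goB pe tips f val pending) ∧
      (∀ k, pe.contains k = true → v0.contains k = false → k ∉ SD pe tips v0 N →
        (goB pe tips f val pending).contains k = true) := by
  intro f
  induction f with
  | zero => intro val pending h; omega
  | succ f ih =>
    intro val pending hlen hB hpend hcomp
    by_cases hemp : pending.isEmpty
    · have hnil : pending = [] := List.isEmpty_iff.1 hemp
      have hgo : goB pe tips (f + 1) val pending = val := by simp [goB, hemp]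
      rw [hgo]
      refine ⟨hB, fun k hk hv _ => ?_⟩
      by_cases hc : val.contains k = true
      · exact hc
      · exact absurd (hnil ▸ hcomp k hk hv (by rw [← Bool.not_eq_true]; exact hc)) (List.not_mem_nil)
    · have hempf : pending.isEmpty = false := by rw [← Bool.not_eq_true]; exact hemp
      have hgo : goB pe tips (f + 1) val pending =
          (if (pending.filter (fun k => (pe.getD k []).any
                (fun c => !tips.contains c && pe.contains c && !val.contains c))).length = pending.length
           then (pending.foldl (fun v k =>
              if (pending.filter (fun k => (pe.getD k []).any
                    (fun c => !tips.contains c && pe.contains c && !val.contains c))).contains k then v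
              else
                v.insert k (decide ((pe.getD k []).length <
                  2 * (pe.getD k []).countP (fun c => tips.contains c || (pe.contains c && v.getD c false))))) val)
           else goB pe tips f
             (pending.foldl (fun v k =>
              if (pending.filter (fun k => (pe.getD k []).any
                    (fun c => !tips.contains c && pe.contains c && !val.contains c))).contains k then v
              else
                v.insert k (decide ((pe.getD k []).length <
                  2 * (pe.getD k []).countP (fun c => tips.contains c || (pe.contains c && v.getD c false))))) val)
             (pending.filter (fun k => (pe.getD k []).any
                (fun c => !tips.contains c && pe.contains c && !val.contains c)))) := by
        simp only [goB, hempf, Bool.false_eq_true, if_false]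
      set rest := pending.filter (fun k => (pe.getD k []).any
          (fun c => !tips.contains c && pe.contains c && !val.contains c)) with hrest
      set val' := pending.foldl (fun v k =>
          if rest.contains k then v
          else
            v.insert k (decide ((pe.getD k []).length <
              2 * (pe.getD k []).countP (fun c => tips.contains c || (pe.contains c && v.getD c false))))) val with hval'
      -- keys kept in `rest` are exactly the blocked ones
      have hno : ∀ k ∈ pending, k ∉ rest → ∀ c ∈ pe.getD k [],
          tips.contains c = true ∨ pe.contains c = false ∨ val.contains c = true := by
        intro k hk hkr c hc
        by_cases h1 : tips.contains c = true
        · exact Or.inl h1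
        by_cases h2 : pe.contains c = true
        · by_cases h3 : val.contains c = true
          · exact Or.inr (Or.inr h3)
          · exfalso
            apply hkr
            rw [hrest]
            refine List.mem_filter.2 ⟨hk, List.any_eq_true.2 ⟨c, hc, ?_⟩⟩
            rw [(by rw [← Bool.not_eq_true]; exact h1 : tips.contains c = false), h2,
                (by rw [← Bool.not_eq_true]; exact h3 : val.contains c = false)]
            rfl
        · exact Or.inr (Or.inl (by rw [← Bool.not_eq_true]; exact h2))
      by_cases heq : rest.length = pending.length
      · -- STALL: rest = pending, nothing got resolved, the loop breaks and returns val
        have hself : rest = pending := by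
          rw [hrest]
          exact List.filter_eq_self.2 ((List.length_filter_eq_length_iff).1 (hrest ▸ heq))
        have hstall : val' = val := by
          rw [hval']
          exact foldl_stall pe tips rest pending val (fun k hk => hself ▸ hk)
        -- every pending key is blocked by another pending key: pending ⊆ every SD iterate
        have hsus : ∀ k ∈ pending, ∃ c ∈ SuccD pe tips v0 k, c ∈ pending := by
          intro k hk
          have hkr : k ∈ rest := hself ▸ hk
          obtain ⟨-, hany⟩ := List.mem_filter.1 (hrest ▸ hkr)
          obtain ⟨c, hc, hcb⟩ := List.any_eq_true.1 hany
          have h1 : tips.contains c = false := by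
            cases h : tips.contains c
            · rfl
            · rw [h] at hcb; simp at hcb
          have h2 : pe.contains c = true := by
            cases h : pe.contains c
            · rw [h] at hcb; simp at hcb
            · rfl
          have h3 : val.contains c = false := by
            cases h : val.contains c
            · rfl
            · rw [h] at hcb; simp at hcb
          have h4 : v0.contains c = false := by
            rw [← Bool.not_eq_true]
            intro hv
            rw [BInv_dom pe tips v0 val hB hv] at h3
            exact Bool.true_eq_false ▸ (by simp at h3)
          refine ⟨c, ?_, hcomp c h2 h4 h3⟩
          unfold SuccD
          exact List.mem_filter.2 ⟨hc, by rw [h1, h2, h4]; rfl⟩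
        have h0 : ∀ k ∈ pending, k ∈ SD pe tips v0 0 := by
          intro k hk
          obtain ⟨h1, h2, _⟩ := hpend k hk
          exact mem_SD_zero pe tips v0 h1 h2
        rw [hgo, if_pos heq, hstall]
        refine ⟨hB, fun k hk hv hkN => ?_⟩
        by_cases hc : val.contains k = true
        · exact hc
        · exact absurd (SD_sustain pe tips v0 pending h0 hsus N k
            (hcomp k hk hv (by rw [← Bool.not_eq_true]; exact hc))) hkN
      · obtain ⟨P0, P1, P2, COV, MON⟩ := foldB_ok pe tips v0 val pending rest hpend hno pending val
          (fun k h => h) (fun x _ => rfl) (fun x hx => Or.inl hx)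
          (fun x hx hcx => absurd hcx (by rw [hx]; exact Bool.false_ne_true))
        have hB' : BInv pe tips v0 val' := by
          refine ⟨fun x hx => ?_, fun x hx => ?_, fun k hkk hkv hkc => ?_⟩
          · rw [P0 x (BInv_dom pe tips v0 val hB hx)]
            exact hB.1 x hx
          · rcases P1 x hx with h | ⟨h, _⟩
            · exact hB.2.1 x h
            · exact Or.inr (hpend x h).1
          · by_cases hvalk : val.contains k = true
            · obtain ⟨g, hv⟩ := hB.2.2 k hkk hkv hvalk
              have gl : ∀ c ∈ pe.getD k [], tips.contains c = true ∨ pe.contains c = false ∨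
                  (val.contains c = true ∧ val'.get? c = val.get? c) := by
                intro c hc
                rcases g c hc with h | h | h
                · exact Or.inl h
                · exact Or.inr (Or.inl h)
                · exact Or.inr (Or.inr ⟨h, P0 c h⟩)
              refine ⟨fun c hc => ?_, ?_⟩
              · rcases gl c hc with h | h | ⟨h, h'⟩
                · exact Or.inl h
                · exact Or.inr (Or.inl h)
                · exact Or.inr (Or.inr (contains_of_get?_pres val val' h' h))
              · rw [getD_of_get?_pres val val' (P0 k hvalk), hv]
                rw [decide_eq_decide]
                have : (pe.getD k []).countP (tips_mem tips pe val') =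
                    (pe.getD k []).countP (tips_mem tips pe val) := by
                  refine List.countP_congr (fun c hc => ?_)
                  rw [tips_mem_congr tips pe val' val (gl c hc)]
                rw [this]
            · have hvf : val.contains k = false := by rw [← Bool.not_eq_true]; exact hvalk
              rcases P1 k hkc with h | ⟨hp, hnr⟩
              · exact absurd h hvalk
              have g := hno k hp hnr
              have gl : ∀ c ∈ pe.getD k [], tips.contains c = true ∨ pe.contains c = false ∨
                  (val.contains c = true ∧ val'.get? c = val.get? c) := by
                intro c hc
                rcases g c hc with h | h | h
                · exact Or.inl h
                · exact Or.inr (Or.inl h)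
                · exact Or.inr (Or.inr ⟨h, P0 c h⟩)
              refine ⟨fun c hc => ?_, ?_⟩
              · rcases gl c hc with h | h | ⟨h, h'⟩
                · exact Or.inl h
                · exact Or.inr (Or.inl h)
                · exact Or.inr (Or.inr (contains_of_get?_pres val val' h' h))
              · rw [P2 k hvf hkc, decide_eq_decide]
                have : (pe.getD k []).countP (tips_mem tips pe val') =
                    (pe.getD k []).countP (tips_mem tips pe val) := by
                  refine List.countP_congr (fun c hc => ?_)
                  rw [tips_mem_congr tips pe val' val (gl c hc)]
                rw [this]
        have hpend' : ∀ k ∈ rest, pe.contains k = true ∧ v0.contains k = false ∧ val'.contains k = false := by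
          intro k hk
          have hkp : k ∈ pending := List.mem_of_mem_filter hk
          obtain ⟨h1, h2, h3⟩ := hpend k hkp
          refine ⟨h1, h2, ?_⟩
          rw [← Bool.not_eq_true]
          intro hc
          rcases P1 k hc with h | ⟨_, hnr⟩
          · rw [h3] at h; exact Bool.false_ne_true h
          · exact hnr hk
        have hcomp' : ∀ k, pe.contains k = true → v0.contains k = false → val'.contains k = false → k ∈ rest := by
          intro k h1 h2 h3
          have hvf : val.contains k = false := by
            rw [← Bool.not_eq_true]
            intro hc
            rw [contains_of_get?_pres val val' (P0 k hc) hc] at h3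
            exact Bool.true_eq_false ▸ (by simp at h3)
          have hkp : k ∈ pending := hcomp k h1 h2 hvf
          by_contra hkr
          rw [COV k hkp hkr] at h3
          simp at h3
        have hlt : rest.length < f := by
          have h1 : rest.length ≤ pending.length := hrest ▸ List.length_filter_le _ _
          omega
        have := ih val' rest hlt hB' hpend' hcomp'
        rw [hgo, if_neg heq]
        exact this

-- ===== VERDICT (by name: the statement is the Claim_ definition above) =====
theorem is_tipico_spec : Claim_equal_is_tipico := by
  intro porcao porcoes_entrada tipicos cache _ hpre
  unfold Spec_is_tipico
  unfold Pre_is_tipico at hpre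
  unfold is_tipico is_tipico_alt
  dsimp only
  set pe := PySem.Dict.mk porcoes_entrada with hpe
  set v0 := PySem.Dict.mk cache with hv0
  set pending := pe.keys.filter (fun k => !v0.contains k) with hpd
  set V := goB pe tipicos (pending.length + 1) v0 pending with hV
  have hB0 : BInv pe tipicos v0 v0 := by
    refine ⟨fun x _ => rfl, fun x hx => Or.inl hx, fun k _ hkv hkc => ?_⟩
    rw [hkv] at hkc
    exact absurd hkc Bool.false_ne_true
  have hpend0 : ∀ k ∈ pending, pe.contains k = true ∧ v0.contains k = false ∧ v0.contains k = false := by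
    intro k hk
    obtain ⟨h1, h2⟩ := List.mem_filter.1 hk
    have hk1 : pe.contains k = true := (PySem.Dict.contains_iff_mem_keys _ _).2 h1
    have hk2 : v0.contains k = false := by simpa using h2
    exact ⟨hk1, hk2, hk2⟩
  have hcomp0 : ∀ k, pe.contains k = true → v0.contains k = false → v0.contains k = false → k ∈ pending := by
    intro k h1 h2 _
    exact List.mem_filter.2 ⟨(PySem.Dict.contains_iff_mem_keys _ _).1 h1, by simp [h2]⟩
  obtain ⟨hBV, hcov⟩ := goB_ok pe tipicos v0 porcoes_entrada.length
    (pending.length + 1) v0 pending (Nat.lt_succ_self _) hB0 hpend0 hcomp0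
  rw [← hV] at hBV hcov
  have hfix : ∀ k, pe.contains k = true → v0.contains k = false → k ∉ SD pe tipicos v0 porcoes_entrada.length →
      V.getD k false = decide ((pe.getD k []).length < 2 * (pe.getD k []).countP (tips_mem tipicos pe V)) := by
    intro k h1 h2 h3
    exact (hBV.2.2 k h1 h2 (hcov k h1 h2 h3)).2
  have hAinv : AInv pe v0 V v0 := by
    refine ⟨fun x hx => hx, fun x _ hx => (hBV.1 x hx).symm⟩
  have hguard : pe.contains porcao = true → (v0.contains porcao = false) →
      porcao ∉ SD pe tipicos v0 ((porcoes_entrada.length + 1) - 1) := by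
    intro h1 h2
    simpa using hpre h1 h2
  obtain ⟨hval, -⟩ := goA_ok pe tipicos v0 V porcoes_entrada.length hcov hfix
    (porcoes_entrada.length + 1) porcao v0 (le_refl _) (Nat.le_add_left 1 _) hAinv
    (fun h1 h2 => hguard h1 h2)
  rw [hval]
  cases hgp : v0.get? porcao with
  | some b =>
    have hVp : V.get? porcao = some b := by
      rw [hBV.1 porcao (contains_of_get?_some v0 hgp), hgp]
    rw [hVp]
  | none =>
    have hv0p : v0.contains porcao = false := not_contains_of_get?_none v0 hgp
    by_cases hk : pe.contains porcao = true
    · have houtN : porcao ∉ SD pe tipicos v0 porcoes_entrada.length := by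
        simpa using hpre hk hv0p
      have hVc := hcov porcao hk hv0p houtN
      have hVp : V.get? porcao = some (V.getD porcao false) := get?_eq_some_getD V hVc
      rw [hVp]
      simp [hk]
    · have hkb : pe.contains porcao = false := by rw [← Bool.not_eq_true]; exact hk
      have hVnc : V.contains porcao = false := by
        rw [← Bool.not_eq_true]
        intro hc
        rcases hBV.2.1 porcao hc with h | h
        · rw [hv0p] at h; exact Bool.false_ne_true h
        · rw [hkb] at h; exact Bool.false_ne_true h
      have hVp : V.get? porcao = none := by
        rw [PySem.Dict.contains_eq_isSome_get?] at hVnc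
        exact Option.not_isSome_iff_eq_none.1 (by rw [hVnc]; exact Bool.false_ne_true)
      rw [hVp]
      have hcomps : pe.getD porcao [] = [] := PySem.Dict.getD_of_not_contains pe [] hkb
      simp [hkb, hcomps]
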